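-- pv_equiv track=rewrite | github.com/hellokugelblitz/nextBus | nextBus.py | separate_times
-- ===== SOURCE A (Python) =====
-- def separate_times(times):
--     province_times = []
--     f_lot_times = []
--     count = 0;
--     for i in range(len(times)):
--         if count == 0:
--             province_times.append(times[i])
--         if count == 2:
--             f_lot_times.append(times[i])
--         count += 1;
--         if count == 3:
--             count = 0
--     return province_times,f_lot_times
-- ===== SOURCE B (Python) =====
-- def separate_times(times):
--     province_times = []
--     f_lot_times = []
--     n = len(times)
--     i = 0
--     while i < n:
--         chunk = times[i:i + 3]
--         province_times.append(chunk[0])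
--         if len(chunk) == 3:
--             f_lot_times.append(chunk[2])
--         i += 3
--     return province_times, f_lot_times
-- ===== Notes on version B (the rewrite author's own statement) =====
-- stated objective: alternative
-- what changed: Replaces the per-element loop with a cycling 0/1/2 counter by a chunked traversal: a while loop advances the index by 3, slices out each 3-element chunk, always takes the chunk's first element and takes its third only when the chunk is full.
import Mathlib
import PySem

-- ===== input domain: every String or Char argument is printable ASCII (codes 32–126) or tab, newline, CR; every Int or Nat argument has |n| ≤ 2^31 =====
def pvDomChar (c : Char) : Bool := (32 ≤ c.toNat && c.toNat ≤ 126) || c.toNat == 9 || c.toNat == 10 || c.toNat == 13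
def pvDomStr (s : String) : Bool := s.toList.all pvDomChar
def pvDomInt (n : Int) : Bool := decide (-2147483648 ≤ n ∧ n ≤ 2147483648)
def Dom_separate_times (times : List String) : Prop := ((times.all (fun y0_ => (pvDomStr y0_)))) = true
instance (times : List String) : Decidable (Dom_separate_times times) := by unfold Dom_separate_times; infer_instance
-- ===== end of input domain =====

-- B replaces A's per-element counter loop by a chunked while loop advancing 3 at a time (objective: alternative, same cost).

-- ===== PORT A =====
-- literal transliteration: loop over range(len(times)) with state (province_times, f_lot_times, count);
-- times[i] is ported as pyGetD (i is always in range here)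
def separate_times (times : List String) : List String × List String :=
  let st := (PySem.List.pyRange 0 (times.length : Int) 1).foldl
    (fun (acc : List String × List String × Int) i =>
      let p := if acc.2.2 == 0 then acc.1 ++ [PySem.List.pyGetD times i ""] else acc.1
      let f := if acc.2.2 == 2 then acc.2.1 ++ [PySem.List.pyGetD times i ""] else acc.2.1
      let c := acc.2.2 + 1
      let c := if c == 3 then 0 else c
      (p, f, c))
    ([], [], 0)
  (st.1, st.2.1)

-- ===== PORT B =====
-- the while loop of Source B: i advances by 3; chunk = times[i:i+3] (PySem slice), chunk[0] always, chunk[2] when full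
def sepLoop (times prov flot : List String) (i : Int) : List String × List String :=
  if _h : i < (times.length : Int) then
    let chunk := PySem.List.slice times (some i) (some (i + 3))
    let prov' := prov ++ [PySem.List.pyGetD chunk 0 ""]
    let flot' := if chunk.length == 3 then flot ++ [PySem.List.pyGetD chunk 2 ""] else flot
    sepLoop times prov' flot' (i + 3)
  else (prov, flot)
termination_by ((times.length : Int) - i).toNat
decreasing_by omega

def separate_times_alt (times : List String) : List String × List String :=
  sepLoop times [] [] 0

-- ===== PRECONDITION & SPEC =====
def Spec_separate_times (times : List String) (out : List String × List String) : Prop := out = separate_times_alt times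
instance (times : List String) (out : List String × List String) : Decidable (Spec_separate_times times out) := by unfold Spec_separate_times; infer_instance

-- ===== CLAIM (what is proved, stated in full; the proofs are below) =====
def Claim_equal_separate_times : Prop := ∀ (times : List String), Dom_separate_times times → Spec_separate_times times (separate_times times)

-- ===== LEMMAS AND PROOFS =====

-- common characterization: recursion consuming three elements at a time
def sep3 : List String → List String × List String
  | [] => ([], [])
  | [a] => ([a], [])
  | [a, _] => ([a], [])
  | a :: _ :: c :: rest => ((sep3 rest).1.cons a, (sep3 rest).2.cons c)

-- A's loop body, as a step function over the elements themselves
def pvStep (acc : List String × List String × Int) (x : String) : List String × List String × Int :=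
  let p := if acc.2.2 == 0 then acc.1 ++ [x] else acc.1
  let f := if acc.2.2 == 2 then acc.2.1 ++ [x] else acc.2.1
  let c := acc.2.2 + 1
  let c := if c == 3 then 0 else c
  (p, f, c)

-- A's fold from count 0 appends exactly the two components of sep3
theorem pvAfold : ∀ (xs : List String) (p f : List String),
    xs.foldl pvStep (p, f, 0) = (p ++ (sep3 xs).1, f ++ (sep3 xs).2, (xs.length : Int) % 3) := by
  intro xs
  induction xs using sep3.induct with
  | case1 => intro p f; simp [sep3]
  | case2 a => intro p f; simp [sep3, pvStep]
  | case3 a b => intro p f; simp [sep3, pvStep]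
  | case4 a b c rest ih =>
    intro p f
    simp only [List.foldl_cons]
    have h1 : pvStep (p, f, 0) a = (p ++ [a], f, 1) := by simp [pvStep]
    have h2 : pvStep (p ++ [a], f, 1) b = (p ++ [a], f, 2) := by simp [pvStep]
    have h3 : pvStep (p ++ [a], f, 2) c = (p ++ [a], f ++ [c], 0) := by simp [pvStep]
    rw [h1, h2, h3, ih]
    simp [sep3]
    omega

-- B's while loop at index i computes sep3 of the remaining suffix
theorem pvBloop : ∀ (xs times : List String) (i : Int), 0 ≤ i → xs = times.drop i.toNat →
    ∀ (p f : List String), sepLoop times p f i = (p ++ (sep3 xs).1, f ++ (sep3 xs).2) := by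
  intro xs
  induction xs using sep3.induct with
  | case1 =>
    intro times i hi hdrop p f
    rw [sepLoop]
    have hlen : (times.length : Int) ≤ i := by
      have := congrArg List.length hdrop; simp at this; omega
    simp [sep3, not_lt.mpr hlen]
  | case2 a =>
    intro times i hi hdrop p f
    have hlen : times.length = i.toNat + 1 := by
      have := congrArg List.length hdrop; simp at this; omega
    rw [sepLoop]
    have hlt : i < (times.length : Int) := by omega
    rw [dif_pos hlt]
    have hchunk : PySem.List.slice times (some i) (some (i + 3)) = [a] := by
      rw [PySem.List.slice_toNat, show ((i + 3).toNat - i.toNat) = 3 from by omega, ← hdrop]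
      · simp
      · omega
      · omega
    simp only [hchunk]
    rw [sepLoop]
    rw [dif_neg (by omega)]
    simp [sep3, PySem.List.pyGetD]
  | case3 a b =>
    intro times i hi hdrop p f
    have hlen : times.length = i.toNat + 2 := by
      have := congrArg List.length hdrop; simp at this; omega
    rw [sepLoop]
    have hlt : i < (times.length : Int) := by omega
    rw [dif_pos hlt]
    have hchunk : PySem.List.slice times (some i) (some (i + 3)) = [a, b] := by
      rw [PySem.List.slice_toNat, show ((i + 3).toNat - i.toNat) = 3 from by omega, ← hdrop]
      · simp
      · omega
      · omega
    simp only [hchunk]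
    rw [sepLoop]
    rw [dif_neg (by omega)]
    simp [sep3, PySem.List.pyGetD]
  | case4 a b c rest ih =>
    intro times i hi hdrop p f
    have hlen : times.length = i.toNat + 3 + rest.length := by
      have := congrArg List.length hdrop; simp at this; omega
    rw [sepLoop]
    have hlt : i < (times.length : Int) := by omega
    rw [dif_pos hlt]
    have hchunk : PySem.List.slice times (some i) (some (i + 3)) = [a, b, c] := by
      rw [PySem.List.slice_toNat, show ((i + 3).toNat - i.toNat) = 3 from by omega, ← hdrop]
      · simp
      · omega
      · omega
    simp only [hchunk]
    have hdrop' : rest = times.drop (i + 3).toNat := by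
      have h3 : rest = List.drop 3 (List.drop i.toNat times) := by rw [← hdrop]; simp
      rw [h3, List.drop_drop]
      congr 1
      omega
    rw [ih times (i + 3) (by omega) hdrop']
    simp [sep3, PySem.List.pyGetD]

-- ===== VERDICT (by name: the statement is the Claim_ definition above) =====
theorem separate_times_spec : Claim_equal_separate_times := by
  intro times _
  unfold Spec_separate_times separate_times separate_times_alt
  rw [show ((fun (acc : List String × List String × Int) i =>
      let p := if acc.2.2 == 0 then acc.1 ++ [PySem.List.pyGetD times i ""] else acc.1
      let f := if acc.2.2 == 2 then acc.2.1 ++ [PySem.List.pyGetD times i ""] else acc.2.1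
      let c := acc.2.2 + 1
      let c := if c == 3 then 0 else c
      (p, f, c)) = fun acc j => pvStep acc (PySem.List.pyGetD times j "")) from rfl]
  rw [PySem.List.foldl_pyRange_zero_pyGetD' times "" pvStep ([], [], 0)]
  rw [pvAfold times [] []]
  rw [pvBloop times times 0 le_rfl (by simp) [] []]
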